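-- pv_equiv track=rewrite | github.com/Rumeysakeskin/Speaker-Verification | files/spellCorrection-master/spellCorrection-master/utils.py | getInsertedCharacterKey
-- ===== SOURCE A (Python) =====
-- def getInsertedCharacterKey(corruptedWord, word):
--     insertedCharacter = "";
--     for i in range(len(corruptedWord)):
--         if i == len(word):
--             insertedCharacter = corruptedWord[i];
--             break;
--         elif corruptedWord[i] != word[i]:
--             insertedCharacter = corruptedWord[i];
--             break;
--     key = insertedCharacter;
--     return key;
-- ===== SOURCE B (Python) =====
-- def getInsertedCharacterKey(corruptedWord, word):
--     # Binary search for the common-prefix length: the predicate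
--     # corruptedWord[:k] == word[:k] is monotone (downward closed) in k,
--     # so the largest k in [0, min(len)] satisfying it is the length of
--     # the common prefix. Then index once past it.
--     lo, hi = 0, min(len(corruptedWord), len(word))
--     while lo < hi:
--         mid = (lo + hi + 1) // 2
--         if corruptedWord[:mid] == word[:mid]:
--             lo = mid
--         else:
--             hi = mid - 1
--     return corruptedWord[lo] if lo < len(corruptedWord) else ""
-- ===== Notes on version B (the rewrite author's own statement) =====
-- stated objective: alternative
-- what changed: Replaces A's linear first-mismatch scan by a binary search over prefix-slice equality (the monotone predicate corruptedWord[:k]==word[:k]) to find the common-prefix length, then indexes once past it.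
import Mathlib
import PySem

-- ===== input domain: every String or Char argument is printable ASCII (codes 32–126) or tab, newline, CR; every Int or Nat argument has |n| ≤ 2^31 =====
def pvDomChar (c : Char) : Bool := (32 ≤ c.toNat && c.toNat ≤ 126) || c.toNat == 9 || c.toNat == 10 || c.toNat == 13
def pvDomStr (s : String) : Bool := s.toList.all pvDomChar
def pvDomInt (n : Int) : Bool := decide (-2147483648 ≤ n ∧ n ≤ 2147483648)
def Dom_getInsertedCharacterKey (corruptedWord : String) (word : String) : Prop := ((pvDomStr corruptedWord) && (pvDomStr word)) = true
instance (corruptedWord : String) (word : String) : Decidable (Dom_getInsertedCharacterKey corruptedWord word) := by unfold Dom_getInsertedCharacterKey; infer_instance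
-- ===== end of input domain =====

-- B replaces A's linear first-mismatch scan by a binary search over prefix-slice
-- equality (a monotone predicate in k), then one index past the common prefix.
-- Objective: alternative (a genuinely different algorithm, not claimed faster).

-- ===== PORT A =====
-- A's for-loop over range(len(corruptedWord)) with break, as the recursion on index i.
def pvALoop (c w : List Char) (i : Nat) : String :=
  if i < c.length then
    if i = w.length then String.ofList [c.getD i default]
    else if c.getD i default ≠ w.getD i default then String.ofList [c.getD i default]
    else pvALoop c w (i + 1)
  else ""
termination_by c.length - i

def getInsertedCharacterKey (corruptedWord : String) (word : String) : String :=
  pvALoop corruptedWord.toList word.toList 0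

-- ===== PORT B =====
-- Source B's while-loop: binary search for the largest k ≤ min(len) with c[:k] == w[:k]
-- (slice s[:k] is List.take k).
def pvBS (c w : List Char) (lo hi : Nat) : Nat :=
  if h : lo < hi then
    let mid := (lo + hi + 1) / 2
    if c.take mid = w.take mid then pvBS c w mid hi else pvBS c w lo (mid - 1)
  else lo
termination_by hi - lo
decreasing_by all_goals omega

def getInsertedCharacterKey_alt (corruptedWord : String) (word : String) : String :=
  let c := corruptedWord.toList
  let w := word.toList
  let L := pvBS c w 0 (min c.length w.length)
  if L < c.length then String.ofList [c.getD L default] else ""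

-- ===== PRECONDITION & SPEC =====
def Spec_getInsertedCharacterKey (corruptedWord : String) (word : String) (out : String) : Prop := out = getInsertedCharacterKey_alt corruptedWord word
instance (corruptedWord : String) (word : String) (out : String) : Decidable (Spec_getInsertedCharacterKey corruptedWord word out) := by unfold Spec_getInsertedCharacterKey; infer_instance

-- ===== CLAIM (what is proved, stated in full; the proofs are below) =====
def Claim_equal_getInsertedCharacterKey : Prop := ∀ (corruptedWord : String) (word : String), Dom_getInsertedCharacterKey corruptedWord word → Spec_getInsertedCharacterKey corruptedWord word (getInsertedCharacterKey corruptedWord word)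

-- ===== LEMMAS AND PROOFS =====

-- the common-prefix length, the mathematical yardstick both ports are measured against
def pvPrefLen : List Char → List Char → Nat
  | a :: as, b :: bs => if a = b then pvPrefLen as bs + 1 else 0
  | _, _ => 0

theorem pvPrefLen_nil_right (cs : List Char) : pvPrefLen cs [] = 0 := by
  cases cs <;> rfl

theorem pvPrefLen_cons (a b : Char) (as bs : List Char) :
    pvPrefLen (a :: as) (b :: bs) = if a = b then pvPrefLen as bs + 1 else 0 := rfl

theorem pvPrefLen_le_left (c w : List Char) : pvPrefLen c w ≤ c.length := by
  induction c generalizing w with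
  | nil => cases w <;> simp [pvPrefLen]
  | cons a as ih =>
    cases w with
    | nil => simp [pvPrefLen_nil_right]
    | cons b bs =>
      rw [pvPrefLen_cons]
      by_cases h : a = b
      · rw [if_pos h]; simpa using ih bs
      · rw [if_neg h]; simp

theorem pvPrefLen_le_right (c w : List Char) : pvPrefLen c w ≤ w.length := by
  induction c generalizing w with
  | nil => cases w <;> simp [pvPrefLen]
  | cons a as ih =>
    cases w with
    | nil => simp [pvPrefLen_nil_right]
    | cons b bs =>
      rw [pvPrefLen_cons]
      by_cases h : a = b
      · rw [if_pos h]; simpa using ih bs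
      · rw [if_neg h]; simp

-- prefix-slice equality at k ⟺ k is below the common-prefix length (for in-range k)
theorem take_eq_iff (c w : List Char) (k : Nat) (hk1 : k ≤ c.length) (hk2 : k ≤ w.length) :
    (c.take k = w.take k) ↔ k ≤ pvPrefLen c w := by
  induction c generalizing w k with
  | nil =>
    have hk0 : k = 0 := by simpa using hk1
    subst hk0
    cases w <;> simp [pvPrefLen]
  | cons a as ih =>
    cases k with
    | zero => simp
    | succ k =>
      cases w with
      | nil => simp at hk2
      | cons b bs =>
        rw [pvPrefLen_cons]
        by_cases h : a = b
        · subst h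
          rw [if_pos rfl]
          simp only [List.take_succ_cons, List.cons.injEq, true_and]
          rw [ih bs k (by simpa using hk1) (by simpa using hk2)]
          omega
        · rw [if_neg h]
          constructor
          · intro he; simp only [List.take_succ_cons, List.cons.injEq] at he; exact absurd he.1 h
          · omega

-- the binary search returns exactly the common-prefix length
theorem pvBS_eq_fuel (c w : List Char) (n : Nat) : ∀ (lo hi : Nat),
    hi - lo ≤ n → lo ≤ pvPrefLen c w → pvPrefLen c w ≤ hi →
    hi ≤ c.length → hi ≤ w.length → pvBS c w lo hi = pvPrefLen c w := by
  induction n with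
  | zero =>
    intro lo hi h1 h2 h3 _ _
    rw [pvBS, dif_neg (by omega)]
    omega
  | succ n ih =>
    intro lo hi h1 h2 h3 hc hw
    rw [pvBS]
    by_cases h : lo < hi
    · rw [dif_pos h]
      simp only
      have hmid1 : lo < (lo + hi + 1) / 2 := by omega
      have hmid2 : (lo + hi + 1) / 2 ≤ hi := by omega
      by_cases hle : (lo + hi + 1) / 2 ≤ pvPrefLen c w
      · rw [if_pos ((take_eq_iff c w _ (by omega) (by omega)).2 hle)]
        exact ih _ hi (by omega) hle h3 hc hw
      · rw [if_neg (fun he => hle ((take_eq_iff c w _ (by omega) (by omega)).1 he))]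
        exact ih lo _ (by omega) h2 (by omega) (by omega) (by omega)
    · rw [dif_neg h]; omega

theorem pvBS_eq (c w : List Char) :
    pvBS c w 0 (min c.length w.length) = pvPrefLen c w :=
  pvBS_eq_fuel c w _ 0 _ (le_refl _) (Nat.zero_le _)
    (le_min (pvPrefLen_le_left c w) (pvPrefLen_le_right c w))
    (min_le_left _ _) (min_le_right _ _)

-- A's loop shifted by one is the loop on the tails
theorem pvALoop_shift_fuel (n : Nat) : ∀ (x y : Char) (cs ws : List Char) (i : Nat),
    cs.length - i ≤ n → pvALoop (x :: cs) (y :: ws) (i + 1) = pvALoop cs ws i := by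
  induction n with
  | zero =>
    intro x y cs ws i h
    conv_lhs => rw [pvALoop]
    conv_rhs => rw [pvALoop]
    rw [if_neg (show ¬ i + 1 < (x :: cs).length by simp; omega),
      if_neg (show ¬ i < cs.length by omega)]
  | succ n ih =>
    intro x y cs ws i h
    rw [pvALoop]; conv_rhs => rw [pvALoop]
    by_cases hi : i < cs.length
    · rw [if_pos (by simp; omega), if_pos hi]
      simp only [List.length_cons, List.getD_cons_succ]
      by_cases hw : i = ws.length
      · rw [if_pos (by omega), if_pos hw]
      · rw [if_neg (by omega), if_neg hw]
        by_cases hc : cs.getD i default ≠ ws.getD i default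
        · rw [if_pos hc, if_pos hc]
        · rw [if_neg hc, if_neg hc]
          exact ih x y cs ws (i + 1) (by omega)
    · rw [if_neg (by simp; omega), if_neg hi]

theorem pvALoop_shift (x y : Char) (cs ws : List Char) (i : Nat) :
    pvALoop (x :: cs) (y :: ws) (i + 1) = pvALoop cs ws i :=
  pvALoop_shift_fuel (cs.length - i) x y cs ws i (Nat.le_refl _)

-- A's loop, characterised by the common-prefix length
theorem pvALoop_eq_pref (cs ws : List Char) :
    pvALoop cs ws 0 =
      if pvPrefLen cs ws < cs.length then String.ofList [cs.getD (pvPrefLen cs ws) default]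
      else "" := by
  induction cs generalizing ws with
  | nil => rw [pvALoop]; simp
  | cons c cs ih =>
    rw [pvALoop]
    cases ws with
    | nil => simp [pvPrefLen_nil_right]
    | cons w ws =>
      rw [pvPrefLen_cons]
      by_cases h : c = w
      · rw [if_pos (by simp), if_neg (by simp), if_neg (by simp [h]), pvALoop_shift, ih ws,
          if_pos h]
        by_cases hl : pvPrefLen cs ws < cs.length
        · rw [if_pos hl, if_pos (by simp; omega)]
          simp
        · rw [if_neg hl, if_neg (by simp; omega)]
      · rw [if_pos (by simp), if_neg (by simp), if_pos (by simp [h]), if_neg h]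
        simp

-- ===== VERDICT (by name: the statement is the Claim_ definition above) =====
theorem getInsertedCharacterKey_spec : Claim_equal_getInsertedCharacterKey := by
  intro c w _
  unfold Spec_getInsertedCharacterKey getInsertedCharacterKey getInsertedCharacterKey_alt
  simp only [pvBS_eq]
  exact pvALoop_eq_pref _ _
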